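-- pv_equiv track=rewrite | github.com/mmorgan23/atlas | src/app.py | is_likely_person_name
-- ===== SOURCE A (Python) =====
-- def is_likely_person_name(text):
--     """Check if the input is likely a person's name (first name or first + last name)"""
--     # Clean the input
--     clean_text = text.strip()
--
--     # Skip if it's too long (more than 4 words is unlikely to be just a name)
--     words = clean_text.split()
--     if len(words) > 4 or len(words) == 0:
--         return False
--
--     # Skip if it contains common non-name words or phrases
--     non_name_indicators = [
--         'hello', 'hi', 'hey', 'thanks', 'thank you', 'please', 'help',
--         'what', 'how', 'when', 'where', 'why', 'who', 'can', 'could',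
--         'would', 'should', 'do', 'does', 'did', 'is', 'are', 'am', 'was', 'were',
--         'the', 'a', 'an', 'and', 'or', 'but', 'so', 'if', 'then', 'that', 'this',
--         'contact', 'email', 'phone', 'information', 'info', 'get', 'find', 'show', 'tell'
--     ]
--
--     text_lower = clean_text.lower()
--
--     # Check for exact matches with non-name indicators (not partial matches)
--     for indicator in non_name_indicators:
--         if indicator == text_lower or f" {indicator} " in f" {text_lower} " or text_lower.startswith(f"{indicator} ") or text_lower.endswith(f" {indicator}"):
--             return False
--
--     # Check if words look like names (should be alphabetic characters only)
--     for word in words: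
--         clean_word = word.replace("'", "").replace("-", "").replace(".", "")
--         if not clean_word.isalpha() or len(clean_word) < 2:
--             return False
--
--     # Additional check: if it's a single word that's very common, it might not be a name
--     # But we'll be more permissive here since names can be common words
--     if len(words) == 1:
--         # Very short words are unlikely to be names
--         if len(clean_text) < 2:
--             return False
--
--     return True
-- ===== SOURCE B (Python) =====
-- # B: word-set lookup over a single space-split tokenization instead of repeated
-- # padded-substring scans per indicator; same word-count and alphabetic-word guards.
--
-- SINGLE_INDICATORS = {
--     'hello', 'hi', 'hey', 'thanks', 'please', 'help',
--     'what', 'how', 'when', 'where', 'why', 'who', 'can', 'could',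
--     'would', 'should', 'do', 'does', 'did', 'is', 'are', 'am', 'was', 'were',
--     'the', 'a', 'an', 'and', 'or', 'but', 'so', 'if', 'then', 'that', 'this',
--     'contact', 'email', 'phone', 'information', 'info', 'get', 'find', 'show', 'tell'
-- }
--
--
-- def _namelike(word):
--     core = [c for c in word if c not in "'-."]
--     return len(core) >= 2 and all(c.isalpha() for c in core)
--
--
-- def is_likely_person_name(text):
--     clean_text = text.strip()
--     words = clean_text.split()
--     if not 1 <= len(words) <= 4:
--         return False
--     # tokens between single spaces (empty tokens kept), matching A's space-padded scans
--     toks = clean_text.lower().split(' ')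
--     if SINGLE_INDICATORS & set(toks):
--         return False
--     if any(a == 'thank' and b == 'you' for a, b in zip(toks, toks[1:])):
--         return False
--     if not all(_namelike(w) for w in words):
--         return False
--     return not (len(words) == 1 and len(clean_text) < 2)
-- ===== Notes on version B (the rewrite author's own statement) =====
-- stated objective: idiomatic
-- what changed: Replaces A's per-indicator four-way padded-substring scans (43 indicators x equality/substring/startswith/endswith over the whole text) by tokenizing the lowered text once on spaces and probing the tokens against a word set, with a single adjacent-pair check for the only multi-word indicator phrase; the per-word cleanup becomes a character filter instead of three chained replaces.
import Mathlib
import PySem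

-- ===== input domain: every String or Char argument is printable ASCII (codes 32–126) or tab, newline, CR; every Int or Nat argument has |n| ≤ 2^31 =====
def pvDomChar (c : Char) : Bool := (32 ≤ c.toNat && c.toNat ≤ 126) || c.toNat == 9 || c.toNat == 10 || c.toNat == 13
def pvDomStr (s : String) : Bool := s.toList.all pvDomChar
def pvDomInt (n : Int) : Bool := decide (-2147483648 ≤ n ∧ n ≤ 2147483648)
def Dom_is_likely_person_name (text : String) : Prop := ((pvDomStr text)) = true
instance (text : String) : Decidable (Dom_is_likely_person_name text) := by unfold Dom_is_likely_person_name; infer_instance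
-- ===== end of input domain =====

-- B replaces A's per-indicator padded-substring scans by one space-split tokenization probed
-- against a word set (plus one adjacent-pair check for 'thank you'): equal return value, idiomatic objective.

-- ===== PORT A =====
def pvIndicators : List (List Char) :=
  ["hello", "hi", "hey", "thanks", "thank you", "please", "help",
   "what", "how", "when", "where", "why", "who", "can", "could",
   "would", "should", "do", "does", "did", "is", "are", "am", "was", "were",
   "the", "a", "an", "and", "or", "but", "so", "if", "then", "that", "this",
   "contact", "email", "phone", "information", "info", "get", "find", "show", "tell"].map String.toList

def pvCheckA (indicator t : List Char) : Bool :=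
  indicator == t || PySem.Chars.isIn (' ' :: indicator ++ [' ']) (' ' :: t ++ [' '])
    || PySem.Chars.startswith t (indicator ++ [' ']) || PySem.Chars.endswith t (' ' :: indicator)

def is_likely_person_name (text : String) : Bool :=
  let clean_text := PySem.Chars.strip text.toList
  let words := PySem.Chars.split₀ clean_text
  if words.length > 4 || words.length == 0 then false
  else
    let text_lower := PySem.Chars.lower clean_text
    if pvIndicators.any (fun indicator => pvCheckA indicator text_lower) then false
    else if words.any (fun word =>
        let clean_word := PySem.Chars.replace (PySem.Chars.replace (PySem.Chars.replace word ['\''] []) ['-'] []) ['.'] []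
        !PySem.Chars.strIsalpha clean_word || decide (clean_word.length < 2)) then false
    else if words.length == 1 && decide (clean_text.length < 2) then false
    else true

-- ===== PORT B =====
def pvSingleList : List (List Char) :=
  ["hello", "hi", "hey", "thanks", "please", "help",
   "what", "how", "when", "where", "why", "who", "can", "could",
   "would", "should", "do", "does", "did", "is", "are", "am", "was", "were",
   "the", "a", "an", "and", "or", "but", "so", "if", "then", "that", "this",
   "contact", "email", "phone", "information", "info", "get", "find", "show", "tell"].map String.toList

def pvSingle : PySem.Set (List Char) := PySem.Set.ofList pvSingleList

def pvNamelike (word : List Char) : Bool :=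
  let core := word.filter (fun c => !("'-.".toList.contains c))
  decide (2 ≤ core.length) && core.all PySem.Chars.isalpha

def is_likely_person_name_alt (text : String) : Bool :=
  let clean_text := PySem.Chars.strip text.toList
  let words := PySem.Chars.split₀ clean_text
  if !(decide (1 ≤ words.length) && decide (words.length ≤ 4)) then false
  else
    let toks := PySem.Chars.splitOn (PySem.Chars.lower clean_text) [' ']
    if toks.any (fun tk => PySem.Set.contains pvSingle tk) then false
    else if (toks.zip toks.tail).any (fun p => p.1 == "thank".toList && p.2 == "you".toList) then false
    else if !(words.all pvNamelike) then false
    else !(words.length == 1 && decide (clean_text.length < 2))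

-- ===== PRECONDITION & SPEC =====
def Spec_is_likely_person_name (text : String) (out : Bool) : Prop := out = is_likely_person_name_alt text
instance (text : String) (out : Bool) : Decidable (Spec_is_likely_person_name text out) := by unfold Spec_is_likely_person_name; infer_instance

-- ===== CLAIM (what is proved, stated in full; the proofs are below) =====
def Claim_equal_is_likely_person_name : Prop := ∀ (text : String), Dom_is_likely_person_name text → Spec_is_likely_person_name text (is_likely_person_name text)

-- ===== LEMMAS AND PROOFS =====

-- reference single-space splitter and its padded encoding ' w1 w2 ... wn '
def pvSplitSp : List Char → List (List Char)
  | [] => [[]]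
  | c :: t =>
    if c = ' ' then [] :: pvSplitSp t
    else match pvSplitSp t with
      | [] => [[c]]
      | x :: xs => (c :: x) :: xs

theorem pvSplitSp_nil : pvSplitSp [] = [[]] := rfl

theorem pvSplitSp_cons (c : Char) (t : List Char) :
    pvSplitSp (c :: t) = if c = ' ' then [] :: pvSplitSp t
      else match pvSplitSp t with | [] => [[c]] | x :: xs => (c :: x) :: xs := rfl

theorem pvSplitSp_ne_nil (l : List Char) : pvSplitSp l ≠ [] := by
  cases l with
  | nil => simp [pvSplitSp]
  | cons c t =>
    simp only [pvSplitSp]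
    split
    · simp
    · split <;> simp

theorem pvSplitOnGo_eq (fuel : Nat) : ∀ (l cur : List Char) (acc' : List (List Char))
    (h : l.length < fuel) (hd : List Char) (tl : List (List Char)) (hsp : pvSplitSp l = hd :: tl),
    PySem.Chars.splitOn.go [' '] fuel l cur acc' = acc'.reverse ++ ((cur.reverse ++ hd) :: tl) := by
  induction fuel with
  | zero => intro l cur acc' h; omega
  | succ n ih =>
    intro l cur acc' h hd tl hsp
    cases l with
    | nil =>
      rw [pvSplitSp_nil] at hsp; simp at hsp
      obtain ⟨h1, h2⟩ := hsp
      simp [PySem.Chars.splitOn.go, ← h1, ← h2]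
    | cons c rest =>
      by_cases hc : c = ' '
      · subst hc
        rw [pvSplitSp_cons, if_pos rfl] at hsp
        obtain ⟨hd', tl', hsp'⟩ := List.exists_cons_of_ne_nil (pvSplitSp_ne_nil rest)
        rw [hsp'] at hsp
        injection hsp with h1 h2
        simp only [PySem.Chars.splitOn.go]
        rw [if_pos (by simp [List.isPrefixOf])]
        simp only [List.length_cons, List.length_nil, List.drop_succ_cons, List.drop_zero]
        rw [ih rest [] (cur.reverse :: acc') (by simp at h; omega) hd' tl' hsp']
        simp [← h1, ← h2]
      · rw [pvSplitSp_cons, if_neg hc] at hsp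
        obtain ⟨hd', tl', hsp'⟩ := List.exists_cons_of_ne_nil (pvSplitSp_ne_nil rest)
        rw [hsp'] at hsp
        simp only at hsp
        injection hsp with h1 h2
        simp only [PySem.Chars.splitOn.go]
        rw [if_neg (by simp [List.isPrefixOf]; exact fun hh => absurd hh.symm hc)]
        rw [ih rest (c :: cur) acc' (by simp at h ⊢; omega) hd' tl' hsp']
        simp [← h1, ← h2]

theorem pvSplitOn_eq (l : List Char) : PySem.Chars.splitOn l [' '] = pvSplitSp l := by
  obtain ⟨hd, tl, hsp⟩ := List.exists_cons_of_ne_nil (pvSplitSp_ne_nil l)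
  rw [PySem.Chars.splitOn, pvSplitOnGo_eq (l.length+1) l [] [] (by omega) hd tl hsp]
  simp [hsp]

theorem pvSplitSp_spaceless (l : List Char) : ∀ w ∈ pvSplitSp l, ' ' ∉ w := by
  induction l with
  | nil => intro w hw; rw [pvSplitSp_nil] at hw; simp at hw; simp [hw]
  | cons c t ih =>
    intro w hw
    rw [pvSplitSp_cons] at hw
    by_cases hc : c = ' '
    · rw [if_pos hc] at hw
      rcases List.mem_cons.mp hw with h | h
      · simp [h]
      · exact ih w h
    · rw [if_neg hc] at hw
      obtain ⟨hd', tl', hsp'⟩ := List.exists_cons_of_ne_nil (pvSplitSp_ne_nil t)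
      rw [hsp'] at hw
      simp only at hw
      rcases List.mem_cons.mp hw with h | h
      · subst h
        intro hmem
        rcases List.mem_cons.mp hmem with h' | h'
        · exact hc h'.symm
        · exact ih hd' (by simp [hsp']) h'
      · exact ih w (by simp [hsp', h])

theorem pvReplaceGo_single_nil (c : Char) : ∀ (fuel : Nat) (l acc : List Char), l.length ≤ fuel →
    PySem.Chars.replace.go [c] [] fuel l acc = acc.reverse ++ l.filter (fun x => !(x == c)) := by
  intro fuel
  induction fuel with
  | zero => intro l acc h; simp at h; simp [h, PySem.Chars.replace.go]
  | succ n ih =>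
    intro l acc h
    cases l with
    | nil => simp [PySem.Chars.replace.go]
    | cons x t =>
      simp only [PySem.Chars.replace.go]
      by_cases hx : x = c
      · subst hx
        simp only [List.isPrefixOf, BEq.rfl, Bool.true_and, List.isPrefixOf_nil_left, if_true]
        rw [ih]
        · simp
        · simpa using Nat.le_of_succ_le_succ (by simpa using h)
      · have : ([c].isPrefixOf (x :: t)) = false := by
          simp [List.isPrefixOf, hx]
          exact fun hh => absurd hh.symm hx
        rw [this]
        simp only [Bool.false_eq_true, if_false]
        rw [ih t (x :: acc) (by simpa using Nat.le_of_succ_le_succ (by simpa using h))]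
        have hbe : (x == c) = false := beq_false_of_ne hx
        simp [List.filter, hbe]

theorem pvReplace_single_nil (s : List Char) (c : Char) :
    PySem.Chars.replace s [c] [] = s.filter (fun x => !(x == c)) := by
  simp [PySem.Chars.replace, pvReplaceGo_single_nil c s.length s [] (le_refl _)]

def pvE (ts : List (List Char)) : List Char := (ts.map (' ' :: ·)).flatten

theorem pvE_splitSp (l : List Char) : pvE (pvSplitSp l) = ' ' :: l := by
  induction l with
  | nil => simp [pvSplitSp, pvE]
  | cons c t ih =>
    rw [pvSplitSp_cons]
    by_cases hc : c = ' '
    · rw [if_pos hc, hc]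
      simpa [pvE] using ih
    · rw [if_neg hc]
      obtain ⟨hd', tl', hsp'⟩ := List.exists_cons_of_ne_nil (pvSplitSp_ne_nil t)
      rw [hsp'] at ih ⊢
      simp only [pvE, List.map_cons, List.flatten_cons] at ih ⊢
      simp at ih
      simp [ih]

theorem pvE_cons_space (ws : List (List Char)) : ∃ r, pvE ws ++ [' '] = ' ' :: r := by
  cases ws with
  | nil => exact ⟨[], rfl⟩
  | cons w ws' => exact ⟨w ++ pvE ws' ++ [' '], by simp [pvE]⟩

theorem pvPrefix_word (w : List Char) : ∀ (v a b : List Char), ' ' ∉ w → ' ' ∉ v →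
    (∃ a', a = ' ' :: a') → (∃ b', b = ' ' :: b') →
    ((w ++ a <+: v ++ b) ↔ w = v ∧ a <+: b) := by
  induction w with
  | nil =>
    intro v a b _ hv ⟨a', ha⟩ ⟨b', hb⟩
    subst ha hb
    constructor
    · intro h
      cases v with
      | nil => exact ⟨rfl, by simpa using h⟩
      | cons y v' =>
        exfalso
        simp only [List.nil_append, List.cons_append] at h
        obtain ⟨t, ht⟩ := h
        simp only [List.cons_append, List.cons.injEq] at ht
        exact hv (by simp [← ht.1])
    · rintro ⟨hv, h⟩; subst hv; simpa using h
  | cons c w' ih =>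
    intro v a b hw hv ha hb
    cases v with
    | nil =>
      obtain ⟨b', hb'⟩ := hb
      subst hb'
      simp only [List.nil_append]
      constructor
      · intro h
        exfalso
        obtain ⟨t, ht⟩ := h
        simp only [List.cons_append, List.cons.injEq] at ht
        exact hw (by simp [ht.1])
      · rintro ⟨h, _⟩; exact absurd h (by simp)
    | cons y v' =>
      simp only [List.cons_append, List.cons_prefix_cons]
      rw [ih v' a b (fun h => hw (List.mem_cons_of_mem _ h)) (fun h => hv (List.mem_cons_of_mem _ h)) ha hb]
      constructor
      · rintro ⟨h1, h2, h3⟩; exact ⟨by rw [h1, h2], h3⟩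
      · rintro ⟨h1, h3⟩; injection h1 with h1a h1b; exact ⟨h1a, h1b, h3⟩

theorem pvE_prefix (ws : List (List Char)) : ∀ (ts : List (List Char)),
    (∀ w ∈ ws, ' ' ∉ w) → (∀ w ∈ ts, ' ' ∉ w) →
    ((pvE ws ++ [' '] <+: pvE ts ++ [' ']) ↔ ws <+: ts) := by
  induction ws with
  | nil =>
    intro ts _ _
    simp only [pvE, List.map_nil, List.flatten_nil, List.nil_append]
    constructor
    · intro _; exact List.nil_prefix
    · intro _
      obtain ⟨r, hr⟩ := pvE_cons_space ts
      rw [show (List.map (fun x => ' ' :: x) ts).flatten ++ [' '] = pvE ts ++ [' '] from rfl, hr]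
      simp
  | cons w ws' ih =>
    intro ts hw ht
    cases ts with
    | nil =>
      simp only [pvE, List.map_nil, List.flatten_nil, List.nil_append, List.map_cons, List.flatten_cons]
      constructor
      · intro h
        exfalso
        obtain ⟨t, htt⟩ := h
        have := congrArg List.length htt
        simp at this
      · intro h; exact absurd h (by simp)
    | cons v ts' =>
      simp only [pvE, List.map_cons, List.flatten_cons]
      have hshape : ∀ (xs : List (List Char)), (' ' :: w ++ (xs.map (' ' :: ·)).flatten) ++ [' '] = ' ' :: (w ++ ((xs.map (' ' :: ·)).flatten ++ [' '])) := by
        intro xs; simp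
      rw [show (' ' :: w ++ (ws'.map (' ' :: ·)).flatten) ++ [' '] = ' ' :: (w ++ (pvE ws' ++ [' '])) by simp [pvE],
          show (' ' :: v ++ (ts'.map (' ' :: ·)).flatten) ++ [' '] = ' ' :: (v ++ (pvE ts' ++ [' '])) by simp [pvE],
          List.cons_prefix_cons]
      simp only [true_and]
      rw [pvPrefix_word w v _ _ (hw w (by simp)) (ht v (by simp)) (pvE_cons_space ws') (pvE_cons_space ts'),
          ih ts' (fun x hx => hw x (by simp [hx])) (fun x hx => ht x (by simp [hx])),
          List.cons_prefix_cons]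

theorem pvSuffix_skip_word (v : List Char) : ∀ (rest t' : List Char), ' ' ∉ v →
    (∃ r, t' = ' ' :: r) → t' <:+ v ++ rest → t' <:+ rest := by
  induction v with
  | nil => intro rest t' _ _ h; simpa using h
  | cons x v' ih =>
    intro rest t' hv hr h
    rcases List.suffix_cons_iff.mp (by simpa using h) with h' | h'
    · exfalso
      obtain ⟨r, hr'⟩ := hr
      rw [hr'] at h'
      injection h' with h1 _
      exact hv (by simp [← h1])
    · exact ih rest t' (fun hh => hv (by simp [hh])) hr h'

theorem pvSuffix_boundary (ts : List (List Char)) : ∀ (t' : List Char), (∀ w ∈ ts, ' ' ∉ w) →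
    t' <:+ pvE ts ++ [' '] → (∃ r, t' = ' ' :: r) →
    ∃ i, t' = pvE (ts.drop i) ++ [' '] := by
  induction ts with
  | nil =>
    intro t' _ hsuf ⟨r, hr⟩
    refine ⟨0, ?_⟩
    simp only [pvE, List.map_nil, List.flatten_nil, List.nil_append] at hsuf ⊢
    rcases List.suffix_cons_iff.mp hsuf with h | h
    · simpa using h
    · exfalso; rw [hr] at h; simpa using h.length_le
  | cons v ts' ih =>
    intro t' ht hsuf hsp
    have hE : pvE (v :: ts') ++ [' '] = ' ' :: (v ++ (pvE ts' ++ [' '])) := by simp [pvE]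
    rw [hE] at hsuf
    rcases List.suffix_cons_iff.mp hsuf with h | h
    · exact ⟨0, by rw [h, List.drop_zero, hE]⟩
    · have h2 : t' <:+ pvE ts' ++ [' '] := pvSuffix_skip_word v _ t' (ht v (by simp)) hsp h
      obtain ⟨i, hi⟩ := ih t' (fun x hx => ht x (by simp [hx])) h2 hsp
      exact ⟨i + 1, by simpa using hi⟩

theorem pvE_infix (ws ts : List (List Char)) (hws : ws ≠ []) (hw : ∀ w ∈ ws, ' ' ∉ w)
    (ht : ∀ w ∈ ts, ' ' ∉ w) :
    (pvE ws ++ [' '] <:+: pvE ts ++ [' ']) ↔ ws <:+: ts := by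
  constructor
  · intro h
    obtain ⟨t', hpre, hsuf⟩ := List.infix_iff_prefix_suffix.mp h
    obtain ⟨r0, hr0⟩ := pvE_cons_space ws
    have hsp : ∃ r, t' = ' ' :: r := by
      obtain ⟨u, hu⟩ := hpre
      rw [hr0] at hu
      cases t' with
      | nil => exfalso; simp at hu
      | cons a b =>
        simp only [List.cons_append, List.cons.injEq] at hu
        exact ⟨b, by rw [← hu.1]⟩
    obtain ⟨i, hi⟩ := pvSuffix_boundary ts t' ht hsuf hsp
    rw [hi] at hpre
    have := (pvE_prefix ws (ts.drop i) hw (fun x hx => ht x (List.mem_of_mem_drop hx))).mp hpre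
    exact this.isInfix.trans (List.drop_suffix i ts).isInfix
  · intro h
    obtain ⟨pre, suf, hps⟩ := h
    subst hps
    have hE : pvE (pre ++ ws ++ suf) = pvE pre ++ pvE ws ++ pvE suf := by simp [pvE]
    obtain ⟨r, hr⟩ := pvE_cons_space suf
    refine ⟨pvE pre, r, ?_⟩
    rw [hE]
    calc pvE pre ++ (pvE ws ++ [' ']) ++ r = pvE pre ++ pvE ws ++ (' ' :: r) := by simp
    _ = pvE pre ++ pvE ws ++ (pvE suf ++ [' ']) := by rw [hr]
    _ = pvE pre ++ pvE ws ++ pvE suf ++ [' '] := by simp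


theorem pvSingleton_infix {a : List Char} {l : List (List Char)} : [a] <:+: l ↔ a ∈ l := by
  constructor
  · rintro ⟨pre, suf, h⟩; rw [← h]; simp
  · intro h
    obtain ⟨p, q, hp⟩ := List.append_of_mem h
    exact ⟨p, q, by simp [hp]⟩

theorem pvPair_infix (a b : List Char) : ∀ (l : List (List Char)),
    ([a, b] <:+: l) ↔ ((l.zip l.tail).any (fun p => p.1 == a && p.2 == b) = true) := by
  intro l
  induction l with
  | nil => simp
  | cons x xs ih =>
    rw [List.infix_cons_iff, ih]
    cases xs with
    | nil =>
      simp only [List.tail_nil, List.zip_nil_right, List.any_nil]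
      constructor
      · rintro (h | h)
        · exfalso; obtain ⟨t, ht⟩ := h; simp at ht
        · exact absurd h (by simp)
      · intro h; exact absurd h (by simp)
    | cons y r =>
      simp only [List.tail_cons, List.zip_cons_cons, List.any_cons, Bool.or_eq_true]
      constructor
      · rintro (h | h)
        · obtain ⟨t, ht⟩ := h
          simp only [List.cons_append, List.cons.injEq] at ht
          left
          simp [ht.1, ht.2.1]
        · right; exact h
      · rintro (h | h)
        · left
          simp only [Bool.and_eq_true, beq_iff_eq] at h
          rw [h.1, h.2]
          exact ⟨r, rfl⟩
        · right; exact h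

theorem pvCheckA_iff (indicator t : List Char) :
    pvCheckA indicator t = true ↔ (' ' :: indicator ++ [' ']) <:+: (' ' :: t ++ [' ']) := by
  unfold pvCheckA
  simp only [Bool.or_eq_true, beq_iff_eq]
  constructor
  · rintro (((h | h) | h) | h)
    · subst h; exact List.infix_refl _
    · exact (PySem.Chars.isIn_iff_infix _ _).mp h
    · rw [PySem.Chars.startswith_iff] at h
      obtain ⟨r, hr⟩ := h
      refine ⟨[], r ++ [' '], ?_⟩
      rw [← hr]; simp
    · rw [PySem.Chars.endswith_iff] at h
      obtain ⟨p, hp⟩ := h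
      refine ⟨' ' :: p, [], ?_⟩
      rw [← hp]; simp
  · intro h
    left; left; right
    exact (PySem.Chars.isIn_iff_infix _ _).mpr h

theorem pvIndicator_cases : ∀ ind ∈ pvIndicators, ind = "thank you".toList ∨ ind ∈ pvSingleList := by
  decide

theorem pvSingle_spaceless : ∀ ind ∈ pvSingleList, ' ' ∉ ind := by decide

theorem pvSingle_sub : ∀ ind ∈ pvSingleList, ind ∈ pvIndicators := by decide

theorem pvThankYou_mem : "thank you".toList ∈ pvIndicators := by decide

theorem pvContains_iff (x : List Char) : PySem.Set.contains pvSingle x = true ↔ x ∈ pvSingleList := by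
  have h1 : PySem.Set.contains pvSingle x = true ↔ x ∈ pvSingle := by
    simp [PySem.Set.contains]
  rw [h1, pvSingle, PySem.Set.mem_ofList]

theorem pvPadded_eq (t : List Char) : ' ' :: t ++ [' '] = pvE (pvSplitSp t) ++ [' '] := by
  rw [pvE_splitSp]

theorem pvE_single (ind : List Char) : pvE [ind] ++ [' '] = ' ' :: ind ++ [' '] := by
  simp [pvE]

theorem pvIndicatorBridge (t : List Char) :
    pvIndicators.any (fun indicator => pvCheckA indicator t) =
    ((pvSplitSp t).any (fun tk => PySem.Set.contains pvSingle tk) ||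
     (((pvSplitSp t).zip (pvSplitSp t).tail).any (fun p => p.1 == "thank".toList && p.2 == "you".toList))) := by
  rw [Bool.eq_iff_iff]
  simp only [List.any_eq_true, Bool.or_eq_true]
  constructor
  · rintro ⟨ind, hmem, hchk⟩
    have hinf := (pvCheckA_iff ind t).mp hchk
    rw [pvPadded_eq t] at hinf
    rcases pvIndicator_cases ind hmem with hty | hsingle
    · right
      subst hty
      have hE : (' ' :: "thank you".toList ++ [' ']) = pvE ["thank".toList, "you".toList] ++ [' '] := by decide
      rw [hE] at hinf
      have := (pvE_infix ["thank".toList, "you".toList] (pvSplitSp t) (by simp) (by decide)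
        (pvSplitSp_spaceless t)).mp hinf
      rw [← List.any_eq_true]
      exact (pvPair_infix _ _ _).mp this
    · left
      rw [show (' ' :: ind ++ [' ']) = pvE [ind] ++ [' '] from (pvE_single ind).symm] at hinf
      have := (pvE_infix [ind] (pvSplitSp t) (by simp)
        (by intro x hx; simp at hx; subst hx; exact pvSingle_spaceless _ hsingle)
        (pvSplitSp_spaceless t)).mp hinf
      exact ⟨ind, pvSingleton_infix.mp this, (pvContains_iff ind).mpr hsingle⟩
  · rintro (⟨tk, htk, hc⟩ | h)
    · have hsingle := (pvContains_iff tk).mp hc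
      refine ⟨tk, pvSingle_sub tk hsingle, (pvCheckA_iff tk t).mpr ?_⟩
      rw [pvPadded_eq t, show (' ' :: tk ++ [' ']) = pvE [tk] ++ [' '] from (pvE_single tk).symm]
      exact (pvE_infix [tk] (pvSplitSp t) (by simp)
        (by intro x hx; simp at hx; subst hx; exact pvSingle_spaceless _ hsingle)
        (pvSplitSp_spaceless t)).mpr (pvSingleton_infix.mpr htk)
    · refine ⟨"thank you".toList, pvThankYou_mem, (pvCheckA_iff _ t).mpr ?_⟩
      rw [pvPadded_eq t, show (' ' :: "thank you".toList ++ [' ']) = pvE ["thank".toList, "you".toList] ++ [' '] from by decide]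
      exact (pvE_infix ["thank".toList, "you".toList] (pvSplitSp t) (by simp) (by decide)
        (pvSplitSp_spaceless t)).mpr ((pvPair_infix _ _ _).mpr (List.any_eq_true.mpr h))

theorem pvWordCond (l : List Char) :
    (!PySem.Chars.strIsalpha l || decide (l.length < 2)) =
    !(decide (2 ≤ l.length) && l.all PySem.Chars.isalpha) := by
  cases hA : l.all PySem.Chars.isalpha <;>
    cases hE : l.isEmpty <;>
      simp_all [PySem.Chars.strIsalpha, List.isEmpty_iff]
  rw [Bool.eq_iff_iff]
  simp [List.isEmpty_iff, hE, List.all_eq_true.mpr hA]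

theorem pvWordBridge (w : List Char) :
    (!PySem.Chars.strIsalpha (PySem.Chars.replace (PySem.Chars.replace (PySem.Chars.replace w ['\''] []) ['-'] []) ['.'] []) ||
      decide ((PySem.Chars.replace (PySem.Chars.replace (PySem.Chars.replace w ['\''] []) ['-'] []) ['.'] []).length < 2)) =
    !pvNamelike w := by
  have hcw : PySem.Chars.replace (PySem.Chars.replace (PySem.Chars.replace w ['\''] []) ['-'] []) ['.'] [] =
      w.filter (fun c => !("'-.".toList.contains c)) := by
    rw [pvReplace_single_nil, pvReplace_single_nil, pvReplace_single_nil,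
        List.filter_filter, List.filter_filter]
    apply List.filter_congr
    intro c _
    rw [show ("'-.".toList) = ['\'', '-', '.'] from rfl]
    simp only [List.contains_cons, List.contains_nil, Bool.or_false]
    by_cases h1 : c = '\'' <;> by_cases h2 : c = '-' <;> by_cases h3 : c = '.' <;>
      simp [h1, h2, h3, BEq.comm, Bool.and_assoc, Bool.and_comm, Bool.and_left_comm]
  rw [hcw]
  simp only [pvNamelike]
  exact pvWordCond _

theorem pvCond1 (n : Nat) : ((decide (n > 4) || (n == 0)) = !(decide (1 ≤ n) && decide (n ≤ 4))) := by
  rw [Bool.eq_iff_iff]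
  simp only [Bool.or_eq_true, decide_eq_true_eq, beq_iff_eq, Bool.not_eq_true', Bool.and_eq_false_iff,
    decide_eq_false_iff_not]
  omega

theorem pvAnyNot (l : List (List Char)) (p : List Char → Bool) :
    (l.any fun w => !p w) = !(l.all p) := by
  induction l with
  | nil => simp
  | cons x xs ih => simp [List.any_cons, List.all_cons, ih, Bool.not_and]

-- ===== VERDICT (by name: the statement is the Claim_ definition above) =====
theorem is_likely_person_name_spec : Claim_equal_is_likely_person_name := by
  intro text _
  unfold Spec_is_likely_person_name is_likely_person_name is_likely_person_name_alt
  simp only []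
  set clean_text := PySem.Chars.strip text.toList with hclean
  set words := PySem.Chars.split₀ clean_text with hwords
  rw [pvCond1 words.length]
  by_cases h1 : (!(decide (1 ≤ words.length) && decide (words.length ≤ 4))) = true
  · rw [h1]; simp
  · rw [Bool.not_eq_true] at h1
    rw [h1]
    simp only [Bool.false_eq_true, if_false]
    rw [pvSplitOn_eq (PySem.Chars.lower clean_text), pvIndicatorBridge (PySem.Chars.lower clean_text)]
    rw [show (fun word => !PySem.Chars.strIsalpha
          (PySem.Chars.replace (PySem.Chars.replace (PySem.Chars.replace word ['\''] []) ['-'] []) ['.'] []) ||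
          decide ((PySem.Chars.replace (PySem.Chars.replace (PySem.Chars.replace word ['\''] []) ['-'] []) ['.'] []).length < 2)) =
        (fun w => !pvNamelike w) from funext pvWordBridge]
    rw [pvAnyNot]
    cases hS : (pvSplitSp (PySem.Chars.lower clean_text)).any (fun tk => PySem.Set.contains pvSingle tk) <;>
      cases hP : ((pvSplitSp (PySem.Chars.lower clean_text)).zip (pvSplitSp (PySem.Chars.lower clean_text)).tail).any
          (fun p => p.1 == "thank".toList && p.2 == "you".toList) <;>
        cases hW : words.all pvNamelike <;>
          cases hL : (words.length == 1 && decide (clean_text.length < 2)) <;>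
            simp [hS, hP, hW, hL]
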